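-- pv_equiv track=rewrite | github.com/robertmatej/python_learning | projects/3Funkcje/zad2Wersja zALX.py | wiecej_niz
-- ===== SOURCE A (Python) =====
-- def wiecej_niz(napis, prog):
--     wynik = set()
--     napis = napis.lower()
--
--     for litera in napis.lower():
--         litera = litera.lower()
--         if napis.count(litera) > prog:
--             wynik.add(litera)
--     return wynik
-- ===== SOURCE B (Python) =====
-- def wiecej_niz(napis, prog):
--     napis = napis.lower()
--     counts = {}
--     for litera in napis:
--         counts[litera] = counts.get(litera, 0) + 1
--     wynik = set()
--     for litera, ile in counts.items():
--         if ile > prog: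
--             wynik.add(litera)
--     return wynik
-- ===== Notes on version B (the rewrite author's own statement) =====
-- stated objective: faster
-- what changed: A rescans the whole string with napis.count(litera) for every character occurrence (quadratic); B builds a frequency dictionary in one pass and then filters its items, removing the inner scan entirely.
import Mathlib
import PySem

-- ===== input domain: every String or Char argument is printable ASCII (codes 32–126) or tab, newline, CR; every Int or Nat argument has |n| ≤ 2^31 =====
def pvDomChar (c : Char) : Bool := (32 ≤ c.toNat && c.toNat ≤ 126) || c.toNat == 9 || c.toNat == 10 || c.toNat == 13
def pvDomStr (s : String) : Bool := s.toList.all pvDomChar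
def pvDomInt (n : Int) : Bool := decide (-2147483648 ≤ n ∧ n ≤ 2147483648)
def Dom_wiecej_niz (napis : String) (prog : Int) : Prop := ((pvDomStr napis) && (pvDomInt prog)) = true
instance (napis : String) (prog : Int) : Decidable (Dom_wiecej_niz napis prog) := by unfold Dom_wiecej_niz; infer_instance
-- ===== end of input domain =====

-- B replaces A's quadratic per-character napis.count rescan by a one-pass frequency
-- dictionary filtered afterwards (measurably faster, asymptotic change).


-- ===== PORT A =====
def wiecej_niz (napis : String) (prog : Int) : List String :=
  let napis2 := PySem.Str.lower napis
  (PySem.Str.lower napis2).toList.foldl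
    (fun wynik ch =>
      let litera := PySem.Str.lower (String.ofList [ch])
      if ((PySem.Str.count napis2 litera : Int) > prog) then PySem.Set.add wynik litera
      else wynik)
    []

-- ===== PORT B =====
def wiecej_niz_alt (napis : String) (prog : Int) : List String :=
  let napis2 := PySem.Str.lower napis
  let counts : PySem.Dict String Int :=
    napis2.toList.foldl
      (fun d ch => d.insert (String.ofList [ch]) (d.getD (String.ofList [ch]) 0 + 1))
      PySem.Dict.empty
  counts.items.foldl
    (fun wynik kv => if kv.2 > prog then PySem.Set.add wynik kv.1 else wynik)
    []

-- ===== PRECONDITION & SPEC =====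
def Spec_wiecej_niz (napis : String) (prog : Int) (out : List String) : Prop := out = wiecej_niz_alt napis prog
instance (napis : String) (prog : Int) (out : List String) : Decidable (Spec_wiecej_niz napis prog out) := by unfold Spec_wiecej_niz; infer_instance

-- ===== CLAIM (what is proved, stated in full; the proofs are below) =====
def Claim_equal_wiecej_niz : Prop := ∀ (napis : String) (prog : Int), Dom_wiecej_niz napis prog → Spec_wiecej_niz napis prog (wiecej_niz napis prog)

-- ===== LEMMAS AND PROOFS =====

-- counting a single-character needle as a substring = counting the character
lemma go_singleton (c : Char) : ∀ (l : List Char) (fuel acc : Nat), l.length ≤ fuel →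
    PySem.Chars.count.go [c] fuel l acc = acc + l.count c := by
  intro l
  induction l with
  | nil => intro fuel acc _; cases fuel <;> simp [PySem.Chars.count.go]
  | cons a t ih =>
    intro fuel acc h
    cases fuel with
    | zero => simp at h
    | succ n =>
      rw [PySem.Chars.count.go]
      by_cases hac : (c == a) = true
      · have hc : c = a := by simpa using hac
        subst hc
        simp only [List.isPrefixOf, BEq.rfl, Bool.and_self, if_true,
          List.length_singleton, List.drop_succ_cons, List.drop_zero]
        rw [ih n (acc + 1) (by simpa using Nat.lt_succ_iff.mp (Nat.lt_of_lt_of_le (Nat.lt_succ_of_le le_rfl) h))]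
        simp
        omega
      · simp only [List.isPrefixOf, hac, Bool.and_true, Bool.false_eq_true, if_false]
        rw [ih n acc (by simp at h; omega)]
        have : a ≠ c := fun e => by simp [e] at hac
        simp [this]

lemma count_singleton (cs : List Char) (c : Char) :
    PySem.Chars.count cs [c] = cs.count c := by
  simpa [PySem.Chars.count] using go_singleton c cs cs.length 0 le_rfl

lemma isupper_iff (c : Char) : PySem.Chars.isupper c = true ↔ 65 ≤ c.toNat ∧ c.toNat ≤ 90 := by
  rw [PySem.Chars.isupper]
  simp only [Bool.and_eq_true, decide_eq_true_eq, Char.le_def, UInt32.le_iff_toNat_le]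
  rfl

lemma char_toNat_ofNat (n : Nat) (h : n < 128) : (Char.ofNat n).toNat = n := by
  unfold Char.ofNat
  rw [dif_pos (by left; omega)]
  rfl

lemma lowerChar_idem (c : Char) :
    PySem.Chars.lowerChar (PySem.Chars.lowerChar c) = PySem.Chars.lowerChar c := by
  unfold PySem.Chars.lowerChar
  by_cases h : PySem.Chars.isupper c = true
  · have hb := (isupper_iff c).mp h
    have hv : (Char.ofNat (c.toNat + 32)).toNat = c.toNat + 32 :=
      char_toNat_ofNat _ (by omega)
    rw [if_pos h, if_neg]
    intro hcon
    have := (isupper_iff _).mp hcon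
    omega
  · rw [if_neg h, if_neg h]

-- mem is preserved by the add-if loop
lemma mem_filterAdd {α β : Type} [BEq β] [LawfulBEq β] (p : α → Prop) [DecidablePred p]
    (f : α → β) (l : List α) (s : PySem.Set β) (x : β) (hx : x ∈ s) :
    x ∈ l.foldl (fun w c => if p c then PySem.Set.add w (f c) else w) s := by
  induction l generalizing s with
  | nil => exact hx
  | cons a t ih =>
    simp only [List.foldl_cons]
    apply ih
    split
    · exact (PySem.Set.mem_add s (f a) x).mpr (Or.inl hx)
    · exact hx

lemma inv_filterAdd {α β : Type} [BEq β] [LawfulBEq β] (p : α → Prop) [DecidablePred p]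
    (f : α → β) (l : List α) : ∀ (s : PySem.Set β) (c : α), c ∈ l → p c →
    f c ∈ l.foldl (fun w c => if p c then PySem.Set.add w (f c) else w) s := by
  induction l with
  | nil => intro s c hc _; cases hc
  | cons a t ih =>
    intro s c hc hp
    simp only [List.foldl_cons]
    rcases List.mem_cons.mp hc with h | h
    · subst h
      apply mem_filterAdd
      simp only [hp, if_pos]
      exact (PySem.Set.mem_add s (f c) (f c)).mpr (Or.inr rfl)
    · exact ih _ c h hp

lemma set_add_of_mem {β : Type} [BEq β] [LawfulBEq β] (s : PySem.Set β) (x : β)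
    (h : x ∈ s) : PySem.Set.add s x = s := by
  simp [PySem.Set.add, PySem.Set.contains, h]

-- folding the add-if loop over a list = folding it over its set of distinct elements
lemma filterAdd_ofList {α β : Type} [BEq α] [LawfulBEq α] [BEq β] [LawfulBEq β]
    (p : α → Prop) [DecidablePred p] (f : α → β) (l : List α) :
    l.foldl (fun w c => if p c then PySem.Set.add w (f c) else w) [] =
    (PySem.Set.ofList l).foldl (fun w c => if p c then PySem.Set.add w (f c) else w) [] := by
  induction l using List.reverseRecOn with
  | nil => rfl
  | append_singleton t a ih =>
    rw [List.foldl_append, PySem.Set.ofList_append_singleton]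
    by_cases hm : a ∈ t
    · have h1 : (PySem.Set.ofList t).add a = PySem.Set.ofList t := by
        apply set_add_of_mem
        exact (PySem.Set.mem_ofList t a).mpr hm
      rw [h1, ← ih]
      simp only [List.foldl_cons, List.foldl_nil]
      split
      · next hp =>
        exact set_add_of_mem _ _ (inv_filterAdd p f t [] a hm hp)
      · rfl
    · have h1 : (PySem.Set.ofList t).add a = PySem.Set.ofList t ++ [a] := by
        simp [PySem.Set.add, PySem.Set.contains, PySem.Set.mem_ofList t a, hm]
      rw [h1, List.foldl_append, ← ih]

lemma mk_singleton_injective : Function.Injective (fun c : Char => String.ofList [c]) := by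
  intro a b h
  have := congrArg String.toList h
  rw [String.toList_ofList, String.toList_ofList] at this
  exact List.singleton_injective this

lemma ofList_map_mk (l : List Char) :
    PySem.Set.ofList (l.map (fun c => String.ofList [c])) =
    (PySem.Set.ofList l).map (fun c => String.ofList [c]) := by
  induction l using List.reverseRecOn with
  | nil => rfl
  | append_singleton t a ih =>
    rw [List.map_append, List.map_singleton, PySem.Set.ofList_append_singleton,
        PySem.Set.ofList_append_singleton, ih]
    by_cases hm : a ∈ t
    · have h1 : (PySem.Set.ofList t).add a = PySem.Set.ofList t :=
        set_add_of_mem _ _ ((PySem.Set.mem_ofList t a).mpr hm)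
      have h2 : String.ofList [a] ∈ (PySem.Set.ofList t).map (fun c => String.ofList [c]) := by
        exact List.mem_map_of_mem ((PySem.Set.mem_ofList t a).mpr hm)
      rw [h1, set_add_of_mem _ _ h2]
    · have hm1 : a ∉ PySem.Set.ofList t := fun h => hm ((PySem.Set.mem_ofList t a).mp h)
      have hm2 : String.ofList [a] ∉ (PySem.Set.ofList t).map (fun c => String.ofList [c]) := by
        intro h
        rcases List.mem_map.mp h with ⟨b, hb, hba⟩
        exact hm1 (mk_singleton_injective hba ▸ hb)
      have h1 : (PySem.Set.ofList t).add a = PySem.Set.ofList t ++ [a] := by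
        simp [PySem.Set.add, PySem.Set.contains, hm1]
      have h2 : PySem.Set.add ((PySem.Set.ofList t).map (fun c => String.ofList [c])) (String.ofList [a]) =
          (PySem.Set.ofList t).map (fun c => String.ofList [c]) ++ [String.ofList [a]] := by
        simp only [PySem.Set.add, PySem.Set.contains, List.contains_iff_mem]
        rw [if_neg (by simpa using hm2)]
      rw [h1, h2, List.map_append, List.map_singleton]

-- ===== VERDICT (by name: the statement is the Claim_ definition above) =====
theorem wiecej_niz_spec : Claim_equal_wiecej_niz := by
  intro napis prog _
  unfold Spec_wiecej_niz wiecej_niz wiecej_niz_alt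
  set L0 : List Char := PySem.Chars.lower napis.toList with hL0
  have hlist : (PySem.Str.lower napis).toList = L0 := PySem.Str.toList_lower napis
  have hidem : PySem.Chars.lower L0 = L0 := by
    simp [hL0, PySem.Chars.lower, List.map_map, Function.comp_def, lowerChar_idem]
  have hmem_lower : ∀ c ∈ L0, PySem.Chars.lowerChar c = c := by
    intro c hc
    rw [hL0, PySem.Chars.lower] at hc
    rcases List.mem_map.mp hc with ⟨b, _, rfl⟩
    exact lowerChar_idem b
  -- A side
  have hA2 : (PySem.Str.lower (PySem.Str.lower napis)).toList = L0 := by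
    rw [PySem.Str.toList_lower, hlist, hidem]
  simp only [hA2, hlist]
  -- rewrite A's body pointwise on elements of L0
  have hAeq : L0.foldl
      (fun wynik ch =>
        let litera := PySem.Str.lower (String.ofList [ch])
        if ((PySem.Str.count (PySem.Str.lower napis) litera : Int) > prog) then
          PySem.Set.add wynik litera else wynik) [] =
      L0.foldl
      (fun wynik ch =>
        if ((L0.count ch : Int) > prog) then
          PySem.Set.add wynik (String.ofList [ch]) else wynik) [] := by
    apply PySem.List.foldl_congr_mem
    intro w ch hch
    have hlit : PySem.Str.lower (String.ofList [ch]) = String.ofList [ch] := by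
      apply String.toList_inj.mp
      rw [PySem.Str.toList_lower, String.toList_ofList]
      simp [PySem.Chars.lower, hmem_lower ch hch]
    have hcnt : PySem.Str.count (PySem.Str.lower napis) (String.ofList [ch]) = L0.count ch := by
      rw [PySem.Str.count_eq, hlist, String.toList_ofList]
      exact count_singleton L0 ch
    simp only [hlit, hcnt]
  rw [hAeq]
  -- B side: the dict is Counter(L0.map mk), its items are the distinct keys with counts
  have hB1 : L0.foldl
      (fun d ch => d.insert (String.ofList [ch]) (d.getD (String.ofList [ch]) 0 + 1))
      PySem.Dict.empty =
      PySem.Dict.counter (L0.map (fun c => String.ofList [c])) := by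
    rw [← PySem.Dict.foldl_insert_getD_add_one_eq_counter, List.foldl_map]
  rw [hB1, PySem.Dict.items_counter, List.foldl_map]
  have hBeq : (PySem.Set.ofList (L0.map fun c => String.ofList [c])).foldl
      (fun wynik k =>
        if (((L0.map fun c => String.ofList [c]).count k : Int) > prog) then
          PySem.Set.add wynik k else wynik) [] =
      (PySem.Set.ofList L0).foldl
      (fun wynik ch =>
        if ((L0.count ch : Int) > prog) then
          PySem.Set.add wynik (String.ofList [ch]) else wynik) [] := by
    rw [ofList_map_mk, List.foldl_map]
    apply PySem.List.foldl_congr_mem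
    intro w ch _
    rw [List.count_map_of_injective L0 _ mk_singleton_injective ch]
  -- simp-normalise B's fold body (kv pattern) into the mapped form used above
  have := filterAdd_ofList (fun ch => ((L0.count ch : Int) > prog))
      (fun c => String.ofList [c]) L0
  rw [hBeq]
  exact this
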